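-- pv_equiv track=rewrite | github.com/tripura-kant/Python-Scripting | scaler/sorting_BASICS/4.py | minimum_cost_to_remove_all_elements
-- ===== SOURCE A (Python) =====
-- def minimum_cost_to_remove_all_elements(A):
--     # Handle the edge case when the array is empty
--     if not A:
--         return 0
--
--     # Sort the array in descending order
--     A.sort(reverse=True)
--
--     # Initialize total cost and current total sum of the array
--     total_cost = 0
--     current_sum = sum(A)
--
--     # Calculate the cost of removing elements
--     for value in A:
--         total_cost += current_sum
--         current_sum -= value
--
--     return total_cost
-- ===== SOURCE B (Python) =====
-- def minimum_cost_to_remove_all_elements(A):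
--     if not A:
--         return 0
--     # Same in-place mutation as A
--     A.sort(reverse=True)
--     total = 0
--     for i, value in enumerate(A):
--         total += value * (i + 1)
--     return total
-- ===== Notes on version B (the rewrite author's own statement) =====
-- stated objective: simpler
-- what changed: Replaces the running suffix-sum accumulator (total sum computed up front, subtracted per step) with a direct position-weighted sum: each element at sorted index i contributes value*(i+1), so no running sum is maintained.
import Mathlib
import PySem

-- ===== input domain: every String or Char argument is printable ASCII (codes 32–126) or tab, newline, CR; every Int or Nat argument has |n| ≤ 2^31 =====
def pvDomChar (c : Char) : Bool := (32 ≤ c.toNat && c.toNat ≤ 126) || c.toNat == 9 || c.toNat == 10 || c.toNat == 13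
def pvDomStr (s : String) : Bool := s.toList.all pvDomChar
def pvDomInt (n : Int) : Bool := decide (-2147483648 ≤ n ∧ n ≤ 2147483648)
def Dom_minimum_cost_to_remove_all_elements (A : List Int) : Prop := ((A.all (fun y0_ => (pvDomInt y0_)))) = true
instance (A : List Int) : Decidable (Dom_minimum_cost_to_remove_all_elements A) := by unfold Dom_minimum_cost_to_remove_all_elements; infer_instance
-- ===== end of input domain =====

-- B replaces A's running suffix-sum accumulator with a direct position-weighted sum (objective: simpler).
-- Both A and B sort the argument list in place (same observable mutation); the proof is about the return value.
-- ===== PORT A =====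
-- loop: for value in s: total_cost += current_sum; current_sum -= value
def minCostLoopA : List Int → Int → Int → Int
  | [], total_cost, _ => total_cost
  | v :: rest, total_cost, current_sum => minCostLoopA rest (total_cost + current_sum) (current_sum - v)

def minimum_cost_to_remove_all_elements (A : List Int) : Int :=
  if A = [] then 0
  else
    let s := PySem.List.sorted A id true
    minCostLoopA s 0 s.sum

-- ===== PORT B =====
-- B: position-weighted sum over enumerate of the descending-sorted list
def minimum_cost_to_remove_all_elements_alt (A : List Int) : Int :=
  if A = [] then 0
  else
    let s := PySem.List.sorted A id true
    (PySem.List.enumerate s).foldl (fun total p => total + p.2 * (p.1 + 1)) 0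

-- ===== PRECONDITION & SPEC =====
def Spec_minimum_cost_to_remove_all_elements (A : List Int) (out : Int) : Prop := out = minimum_cost_to_remove_all_elements_alt A
instance (A : List Int) (out : Int) : Decidable (Spec_minimum_cost_to_remove_all_elements A out) := by unfold Spec_minimum_cost_to_remove_all_elements; infer_instance

-- ===== CLAIM (what is proved, stated in full; the proofs are below) =====
def Claim_equal_minimum_cost_to_remove_all_elements : Prop := ∀ (A : List Int), Dom_minimum_cost_to_remove_all_elements A → Spec_minimum_cost_to_remove_all_elements A (minimum_cost_to_remove_all_elements A)

-- ===== LEMMAS AND PROOFS =====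

-- the enumerate fold, generalized over start offset and accumulator
theorem foldl_enum_eq (l : List Int) : ∀ (n : Int) (acc : Int),
    (PySem.List.enumerate l n).foldl (fun total p => total + p.2 * (p.1 + 1)) acc
      = acc + ((PySem.List.enumerate l n).map (fun p => p.2 * (p.1 + 1))).sum := by
  induction l with
  | nil => intro n acc; simp [PySem.List.enumerate_nil]
  | cons v rest ih =>
    intro n acc
    simp [PySem.List.enumerate_cons, List.foldl_cons, ih (n+1)]
    ring

-- weighted sum with shifted offset equals weighted sum at base offset plus shift*sum
theorem enum_wsum_shift (l : List Int) : ∀ (n : Int),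
    ((PySem.List.enumerate l (n+1)).map (fun p => p.2 * (p.1 + 1))).sum
      = ((PySem.List.enumerate l n).map (fun p => p.2 * (p.1 + 1))).sum + l.sum := by
  induction l with
  | nil => intro n; simp [PySem.List.enumerate_nil]
  | cons v rest ih =>
    intro n
    simp [PySem.List.enumerate_cons, ih (n+1)]
    ring

-- A's accumulator loop, started with the list's sum, equals B's weighted sum
theorem loopA_eq_wsum (l : List Int) : ∀ (tc : Int),
    minCostLoopA l tc l.sum
      = tc + ((PySem.List.enumerate l 0).map (fun p => p.2 * (p.1 + 1))).sum := by
  induction l with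
  | nil => intro tc; simp [minCostLoopA, PySem.List.enumerate_nil]
  | cons v rest ih =>
    intro tc
    have h : (v :: rest).sum - v = rest.sum := by simp
    show minCostLoopA rest (tc + (v :: rest).sum) ((v :: rest).sum - v) = _
    rw [h, ih, PySem.List.enumerate_cons, List.map_cons]
    simp only [List.sum_cons]
    rw [enum_wsum_shift rest 0]
    ring

-- ===== VERDICT (by name: the statement is the Claim_ definition above) =====
theorem minimum_cost_to_remove_all_elements_spec : Claim_equal_minimum_cost_to_remove_all_elements := by
  intro A _
  unfold Spec_minimum_cost_to_remove_all_elements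
  unfold minimum_cost_to_remove_all_elements minimum_cost_to_remove_all_elements_alt
  by_cases h : A = []
  · simp [h]
  · simp only [if_neg h]
    rw [foldl_enum_eq, loopA_eq_wsum]
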